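-- pv_equiv track=rewrite | github.com/nimashoghi/nshconfig | src/nshconfig/_src/export.py | _is_submodule
-- ===== SOURCE A (Python) =====
-- def _is_submodule(module: str, parent_module: str) -> bool:
--     """Check if a module is a submodule of another module.
--
--     Args:
--         module: The module to check
--         parent_module: The potential parent module
--
--     Returns:
--         True if module is a submodule of parent_module, False otherwise
--
--     Example:
--         >>> _is_submodule("mymodule.submodule", "mymodule")
--         True
--         >>> _is_submodule("mymodule", "mymodule")
--         True
--         >>> _is_submodule("mymodulea.submodule", "mymodule")
--         False
--     """
--     if module == parent_module:
--         return True
--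
--     # Split both into parts
--     module_parts = module.split(".")
--     parent_parts = parent_module.split(".")
--
--     # Parent must be shorter
--     if len(parent_parts) > len(module_parts):
--         return False
--
--     # Check that all parent parts match exactly
--     return all(m == p for m, p in zip(module_parts, parent_parts))
-- ===== SOURCE B (Python) =====
-- def _is_submodule(module: str, parent_module: str) -> bool:
--     """Check if a module is a submodule of another module (prefix idiom)."""
--     return module == parent_module or module.startswith(parent_module + ".")
-- ===== Notes on version B (the rewrite author's own statement) =====
-- stated objective: idiomatic
-- what changed: Replaces the split-into-parts / length check / zip-compare machinery with the direct string-prefix idiom: module == parent or module.startswith(parent + '.').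
import Mathlib
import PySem

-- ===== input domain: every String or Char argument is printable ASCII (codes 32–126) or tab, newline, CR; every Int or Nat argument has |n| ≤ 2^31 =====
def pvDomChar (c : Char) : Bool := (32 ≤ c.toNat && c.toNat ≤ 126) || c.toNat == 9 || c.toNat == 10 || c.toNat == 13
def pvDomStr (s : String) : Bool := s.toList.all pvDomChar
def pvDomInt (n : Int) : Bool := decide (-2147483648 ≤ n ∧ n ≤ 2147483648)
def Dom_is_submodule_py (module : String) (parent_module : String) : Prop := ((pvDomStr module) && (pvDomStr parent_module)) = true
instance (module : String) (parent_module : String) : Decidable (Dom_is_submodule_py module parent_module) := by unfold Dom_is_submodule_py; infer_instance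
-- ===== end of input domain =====

-- B replaces A's split/len/zip machinery with the direct string-prefix idiom (same behaviour, simpler control flow).

-- ===== PORT A =====
def is_submodule_py (module : String) (parent_module : String) : Bool :=
  if module == parent_module then true
  else
    let module_parts := PySem.Chars.splitOn module.toList ['.']
    let parent_parts := PySem.Chars.splitOn parent_module.toList ['.']
    if parent_parts.length > module_parts.length then false
    else (module_parts.zip parent_parts).all (fun mp => mp.1 == mp.2)

-- ===== PORT B =====
def is_submodule_py_alt (module : String) (parent_module : String) : Bool :=
  module == parent_module || PySem.Chars.startswith module.toList (parent_module.toList ++ ['.'])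

-- ===== PRECONDITION & SPEC =====
def Spec_is_submodule_py (module : String) (parent_module : String) (out : Bool) : Prop := out = is_submodule_py_alt module parent_module
instance (module : String) (parent_module : String) (out : Bool) : Decidable (Spec_is_submodule_py module parent_module out) := by unfold Spec_is_submodule_py; infer_instance

-- ===== CLAIM (what is proved, stated in full; the proofs are below) =====
def Claim_equal_is_submodule_py : Prop := ∀ (module : String) (parent_module : String), Dom_is_submodule_py module parent_module → Spec_is_submodule_py module parent_module (is_submodule_py module parent_module)

-- ===== LEMMAS AND PROOFS =====

/-- Simple structural model of Python's `s.split(".")` on char lists. -/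
def splitDot : List Char → List (List Char)
  | [] => [[]]
  | c :: rest => if c = '.' then [] :: splitDot rest else (splitDot rest).modifyHead (c :: ·)

theorem splitDot_ne_nil (l : List Char) : splitDot l ≠ [] := by
  cases l with
  | nil => simp [splitDot]
  | cons c rest =>
    simp only [splitDot]
    split_ifs
    · simp
    · cases h : splitDot rest with
      | nil => exact absurd h (splitDot_ne_nil rest)
      | cons a t => simp

theorem splitDot_exists_cons (l : List Char) : ∃ h t, splitDot l = h :: t := by
  cases h : splitDot l with
  | nil => exact absurd h (splitDot_ne_nil l)
  | cons a t => exact ⟨a, t, rfl⟩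

theorem splitOn_go_spec :
    ∀ (n : Nat) (l cur : List Char) (acc : List (List Char)), l.length < n →
      PySem.Chars.splitOn.go ['.'] n l cur acc =
        acc.reverse ++ (splitDot l).modifyHead (cur.reverse ++ ·) := by
  intro n
  induction n with
  | zero => intro l cur acc h; exact absurd h (Nat.not_lt_zero _)
  | succ n ih =>
    intro l cur acc h
    cases l with
    | nil =>
      simp [PySem.Chars.splitOn.go, splitDot]
    | cons c rest =>
      by_cases hc : c = '.'
      · subst hc
        have hpre : List.isPrefixOf ['.'] ('.' :: rest) = true := by
          simp [List.isPrefixOf]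
        rw [show PySem.Chars.splitOn.go ['.'] (n+1) ('.' :: rest) cur acc =
              PySem.Chars.splitOn.go ['.'] n (List.drop 1 ('.' :: rest)) [] (cur.reverse :: acc) by
            simp [PySem.Chars.splitOn.go, hpre]]
        have hlen : rest.length < n := by simpa using h
        rw [List.drop_one, List.tail_cons, ih rest [] (cur.reverse :: acc) hlen]
        obtain ⟨hd, tl, heq⟩ := splitDot_exists_cons rest
        simp [splitDot, heq]
      · have hpre : List.isPrefixOf ['.'] (c :: rest) = false := by
          simp [List.isPrefixOf]
          exact fun hx => hc hx.symm
        rw [show PySem.Chars.splitOn.go ['.'] (n+1) (c :: rest) cur acc =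
              PySem.Chars.splitOn.go ['.'] n rest (c :: cur) acc by
            simp [PySem.Chars.splitOn.go, hpre]]
        have hlen : rest.length < n := by simpa using h
        rw [ih rest (c :: cur) acc hlen]
        obtain ⟨hd, tl, heq⟩ := splitDot_exists_cons rest
        simp [splitDot, hc, heq]

theorem splitOn_eq_splitDot (l : List Char) :
    PySem.Chars.splitOn l ['.'] = splitDot l := by
  unfold PySem.Chars.splitOn
  rw [splitOn_go_spec (l.length + 1) l [] [] (by omega)]
  obtain ⟨hd, tl, heq⟩ := splitDot_exists_cons l
  simp [heq]

/-- A's length check + zip-all on the parts is exactly list prefix. -/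
theorem prefix_iff_len_zip (Y X : List (List Char)) :
    Y <+: X ↔ (Y.length ≤ X.length ∧ (X.zip Y).all (fun mp => mp.1 == mp.2) = true) := by
  induction Y generalizing X with
  | nil => simp
  | cons y Y' ih =>
    cases X with
    | nil => simp
    | cons x X' =>
      simp only [List.cons_prefix_cons, List.zip_cons_cons, List.all_cons, List.length_cons,
        Nat.add_le_add_iff_right, Bool.and_eq_true, beq_iff_eq]
      rw [ih X']
      constructor
      · rintro ⟨rfl, h1, h2⟩; exact ⟨h1, rfl, h2⟩
      · rintro ⟨h1, rfl, h2⟩; exact ⟨rfl, h1, h2⟩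

/-- Key: part-list prefix = equality or string prefix with a '.' boundary. -/
theorem splitDot_prefix_iff (ps cs : List Char) :
    splitDot ps <+: splitDot cs ↔ (ps = cs ∨ (ps ++ ['.']) <+: cs) := by
  induction ps generalizing cs with
  | nil =>
    cases cs with
    | nil => simp [splitDot]
    | cons c cs' =>
      by_cases hc : c = '.'
      · subst hc; simp [splitDot, List.cons_prefix_cons]
      · obtain ⟨hd, tl, heq⟩ := splitDot_exists_cons cs'
        simp [splitDot, hc, heq, List.cons_prefix_cons, Ne.symm hc]
  | cons p ps' ih =>
    cases cs with
    | nil =>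
      constructor
      · intro hpre
        have hlen := hpre.length_le
        by_cases hp : p = '.'
        · subst hp
          simp [splitDot] at hlen
          exact absurd hlen (splitDot_ne_nil ps')
        · obtain ⟨hd, tl, heq⟩ := splitDot_exists_cons ps'
          simp [splitDot, hp, heq, List.cons_prefix_cons] at hpre
      · rintro (h | h)
        · exact absurd h (by simp)
        · exact absurd h.length_le (by simp)
    | cons c cs' =>
      by_cases hp : p = '.' <;> by_cases hc : c = '.'
      · subst hp; subst hc
        rw [show splitDot ('.' :: ps') = [] :: splitDot ps' from by simp [splitDot],
            show splitDot ('.' :: cs') = [] :: splitDot cs' from by simp [splitDot],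
            List.cons_prefix_cons]
        simp only [List.cons_append, List.cons_prefix_cons, List.cons.injEq, true_and]
        exact ih cs'
      · subst hp
        obtain ⟨hd, tl, heq⟩ := splitDot_exists_cons cs'
        simp [splitDot, hc, heq, List.cons_prefix_cons, Ne.symm hc]
      · subst hc
        obtain ⟨hd, tl, heq⟩ := splitDot_exists_cons ps'
        simp [splitDot, heq, List.cons_prefix_cons, hp]
      · obtain ⟨hd1, tl1, heq1⟩ := splitDot_exists_cons ps'
        obtain ⟨hd2, tl2, heq2⟩ := splitDot_exists_cons cs'
        by_cases hpc : p = c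
        · subst hpc
          rw [show splitDot (p :: ps') = (p :: hd1) :: tl1 from by simp [splitDot, hp, heq1],
              show splitDot (p :: cs') = (p :: hd2) :: tl2 from by simp [splitDot, hc, heq2],
              List.cons_prefix_cons]
          simp only [List.cons.injEq, List.cons_append, List.cons_prefix_cons, true_and]
          rw [← List.cons_prefix_cons, ← heq1, ← heq2]
          exact ih cs'
        · simp [splitDot, hp, hc, heq1, heq2, List.cons_prefix_cons, hpc]

theorem central (module parent_module : String) :
    ((¬ (PySem.Chars.splitOn parent_module.toList ['.']).length >
        (PySem.Chars.splitOn module.toList ['.']).length) ∧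
      ((PySem.Chars.splitOn module.toList ['.']).zip
        (PySem.Chars.splitOn parent_module.toList ['.'])).all (fun mp => mp.1 == mp.2) = true)
    ↔ (parent_module.toList = module.toList ∨
        parent_module.toList ++ ['.'] <+: module.toList) := by
  rw [← splitDot_prefix_iff, ← splitOn_eq_splitDot, ← splitOn_eq_splitDot, prefix_iff_len_zip]
  constructor
  · rintro ⟨h1, h2⟩; exact ⟨by omega, h2⟩
  · rintro ⟨h1, h2⟩; exact ⟨by omega, h2⟩

theorem main_eq (module parent_module : String) :
    is_submodule_py module parent_module = is_submodule_py_alt module parent_module := by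
  by_cases heq : (module == parent_module) = true
  · simp [is_submodule_py, is_submodule_py_alt, heq]
  · have heq' : (module == parent_module) = false := by simpa using heq
    have hne : parent_module.toList ≠ module.toList := by
      intro h
      exact (beq_eq_false_iff_ne.mp heq') (String.toList_inj.mp h).symm
    unfold is_submodule_py is_submodule_py_alt
    simp only [heq', Bool.false_eq_true, if_false, Bool.false_or]
    rw [Bool.eq_iff_iff, PySem.Chars.startswith_iff]
    by_cases hlen : (PySem.Chars.splitOn parent_module.toList ['.']).length >
        (PySem.Chars.splitOn module.toList ['.']).length
    · rw [if_pos hlen]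
      constructor
      · intro h; simp at h
      · intro h
        exact absurd hlen ((central module parent_module).mpr (Or.inr h)).1
    · rw [if_neg hlen]
      constructor
      · intro h
        rcases (central module parent_module).mp ⟨hlen, h⟩ with h' | h'
        · exact absurd h' hne
        · exact h'
      · intro h
        exact ((central module parent_module).mpr (Or.inr h)).2

-- ===== VERDICT (by name: the statement is the Claim_ definition above) =====
theorem is_submodule_py_spec : Claim_equal_is_submodule_py := by
  intro module parent_module _
  exact main_eq module parent_module
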